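-- pv_equiv track=rewrite | github.com/coreymizzou/AoC2019 | day1.py | fuelPartTwo
-- ===== SOURCE A (Python) =====
-- def fuelNeeded(mass):
--     fuel = int(mass) // 3 -2
--     return fuel
--
-- def fuelPartTwo(mass):
--     fuelList = []
--     for x in mass:
--         newFuel = fuelNeeded(x)
--         totalFuel = 0
--         while newFuel > 0:
--             totalFuel += newFuel
--             newFuel = fuelNeeded(newFuel)
--         fuelList.append(totalFuel)
--     return sum(fuelList)
-- ===== SOURCE B (Python) =====
-- def fuelPartTwo(mass):
--     def totalFuel(f):
--         nf = f // 3 - 2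
--         return 0 if nf <= 0 else nf + totalFuel(nf)
--     return sum(totalFuel(int(x)) for x in mass)
-- ===== Notes on version B (the rewrite author's own statement) =====
-- stated objective: simpler
-- what changed: Replaces the explicit while-loop with mutable accumulator and intermediate fuelList with a recursive totalFuel helper over the decreasing fuel chain, summed directly by a generator expression.
import Mathlib
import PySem

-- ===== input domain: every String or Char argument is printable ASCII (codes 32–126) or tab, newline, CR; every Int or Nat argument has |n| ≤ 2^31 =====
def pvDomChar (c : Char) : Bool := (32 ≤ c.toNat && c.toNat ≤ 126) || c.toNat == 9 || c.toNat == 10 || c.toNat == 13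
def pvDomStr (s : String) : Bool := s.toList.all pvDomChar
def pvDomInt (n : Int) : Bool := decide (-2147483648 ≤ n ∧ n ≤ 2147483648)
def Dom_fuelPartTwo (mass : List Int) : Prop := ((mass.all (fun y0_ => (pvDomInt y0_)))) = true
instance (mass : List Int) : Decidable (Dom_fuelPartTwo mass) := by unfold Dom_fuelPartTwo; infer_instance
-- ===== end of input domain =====

-- B replaces A's while-loop + fuelList accumulation with a recursive totalFuel helper summed directly (simpler decomposition, same cost).
-- ===== PORT A =====
def fuelNeeded (mass : Int) : Int := PySem.Int.floordiv mass 3 - 2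

def fuelLoopA (newFuel totalFuel : Int) : Int :=
  if newFuel > 0 then fuelLoopA (fuelNeeded newFuel) (totalFuel + newFuel) else totalFuel
termination_by newFuel.toNat
decreasing_by
  simp only [fuelNeeded, PySem.Int.floordiv_eq_ediv_of_pos (by omega : (0:Int) < 3)]
  omega

def fuelPartTwo (mass : List Int) : Int :=
  (mass.foldl (fun fuelList x => fuelList ++ [fuelLoopA (fuelNeeded x) 0]) []).sum

-- ===== PORT B =====
def totalFuelB (f : Int) : Int :=
  let nf := PySem.Int.floordiv f 3 - 2
  if nf ≤ 0 then 0 else nf + totalFuelB nf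
termination_by f.toNat
decreasing_by
  have h3 : PySem.Int.floordiv f 3 = f / 3 := PySem.Int.floordiv_eq_ediv_of_pos (by omega)
  omega

def fuelPartTwo_alt (mass : List Int) : Int := (mass.map totalFuelB).sum

-- ===== PRECONDITION & SPEC =====
def Spec_fuelPartTwo (mass : List Int) (out : Int) : Prop := out = fuelPartTwo_alt mass
instance (mass : List Int) (out : Int) : Decidable (Spec_fuelPartTwo mass out) := by unfold Spec_fuelPartTwo; infer_instance

-- ===== CLAIM (what is proved, stated in full; the proofs are below) =====
def Claim_equal_fuelPartTwo : Prop := ∀ (mass : List Int), Dom_fuelPartTwo mass → Spec_fuelPartTwo mass (fuelPartTwo mass)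

-- ===== LEMMAS AND PROOFS =====

-- ===== VERDICT (by name: the statement is the Claim_ definition above) =====
theorem loop_eq_totalFuelB (f acc : Int) : fuelLoopA (fuelNeeded f) acc = acc + totalFuelB f := by
  rw [fuelLoopA, totalFuelB.eq_def]
  by_cases h : fuelNeeded f > 0
  · have h' : ¬ (PySem.Int.floordiv f 3 - 2 ≤ 0) := by simpa [fuelNeeded] using h
    simp only [h, if_true, h', if_false]
    rw [loop_eq_totalFuelB (fuelNeeded f) (acc + fuelNeeded f)]
    simp only [fuelNeeded]
    ring
  · have h' : (PySem.Int.floordiv f 3 - 2 ≤ 0) := by simpa [fuelNeeded] using not_lt.mp h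
    simp only [if_neg h, if_pos h', add_zero]
termination_by (fuelNeeded f).toNat
decreasing_by
  simp only [fuelNeeded, PySem.Int.floordiv_eq_ediv_of_pos (by omega : (0:Int) < 3)] at *
  omega

theorem foldl_append_map (g : Int → Int) (mass : List Int) (init : List Int) :
    mass.foldl (fun l x => l ++ [g x]) init = init ++ mass.map g := by
  induction mass generalizing init with
  | nil => simp
  | cons x xs ih => simp [List.foldl_cons, ih]

theorem fuelPartTwo_spec : Claim_equal_fuelPartTwo := by
  intro mass _
  unfold Spec_fuelPartTwo fuelPartTwo fuelPartTwo_alt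
  rw [foldl_append_map (fun x => fuelLoopA (fuelNeeded x) 0) mass []]
  simp only [List.nil_append]
  congr 1
  exact List.map_congr_left (fun x _ => by rw [loop_eq_totalFuelB]; ring)
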